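-- pv_equiv track=rewrite | github.com/OrdinaryOctave/advent-of-code | 2022/solutions/day25.py | SnafuToInt
-- ===== SOURCE A (Python) =====
-- def SnafuToInt(snafu: str):
--     snafuDict = {
--         '=': -2,
--         '-': -1,
--         '0': 0,
--         '1': 1,
--         '2': 2
--     }
--
--     integer = 0
--     snafu = snafu[::-1]
--     for i in range(len(snafu)):
--         if i == 0:
--             integer += snafuDict[snafu[i]]
--         else:
--             integer += snafuDict[snafu[i]] * pow(5,i)
--     return integer
-- ===== SOURCE B (Python) =====
-- def SnafuToInt(snafu: str):
--     snafuDict = {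
--         '=': -2,
--         '-': -1,
--         '0': 0,
--         '1': 1,
--         '2': 2
--     }
--     integer = 0
--     for c in snafu:
--         integer = integer * 5 + snafuDict[c]
--     return integer
-- ===== Notes on version B (the rewrite author's own statement) =====
-- stated objective: idiomatic
-- what changed: B uses Horner's method over the string left-to-right (integer = integer*5 + digit), removing A's string reversal and per-digit pow(5,i) computation.
import Mathlib
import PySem

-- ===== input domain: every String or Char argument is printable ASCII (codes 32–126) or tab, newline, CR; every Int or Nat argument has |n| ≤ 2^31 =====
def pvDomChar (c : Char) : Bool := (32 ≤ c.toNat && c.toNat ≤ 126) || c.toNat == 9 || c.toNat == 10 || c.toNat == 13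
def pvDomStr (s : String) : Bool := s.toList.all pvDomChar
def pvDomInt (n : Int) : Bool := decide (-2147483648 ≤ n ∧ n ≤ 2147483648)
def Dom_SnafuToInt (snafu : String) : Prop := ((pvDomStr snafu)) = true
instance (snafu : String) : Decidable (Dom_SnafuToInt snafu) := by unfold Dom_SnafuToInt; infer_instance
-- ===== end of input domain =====

-- B replaces A's reverse-and-pow digit sum by Horner's method (idiomatic, one forward pass, no pow).

-- the SNAFU digit dictionary, shared verbatim by both Pythons
def snafuDict : PySem.Dict Char Int :=
  PySem.Dict.ofList [('=', -2), ('-', -1), ('0', 0), ('1', 1), ('2', 2)]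

-- ===== PORT A =====
-- A: reverse the string, then for each index i add digit * 5^i (i = 0 without the pow).
def SnafuToInt (snafu : String) : Int :=
  let rev : List Char := snafu.toList.reverse
  (PySem.List.pyRange 0 (PySem.List.len rev) 1).foldl
    (fun integer i =>
      if i = 0 then integer + snafuDict.getD (PySem.List.pyGetD rev i ' ') 0
      else integer + snafuDict.getD (PySem.List.pyGetD rev i ' ') 0 * 5 ^ i.toNat)
    0

-- ===== PORT B =====
-- B: single left-to-right pass, integer = integer * 5 + digit.
def SnafuToInt_alt (snafu : String) : Int :=
  snafu.toList.foldl (fun integer c => integer * 5 + snafuDict.getD c 0) 0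

-- ===== PRECONDITION & SPEC =====
-- Pre_ excludes exactly the strings containing a character that is not one of the five SNAFU digit characters, on which both
-- A and B raise KeyError at the dict lookup.
def Pre_SnafuToInt (snafu : String) : Prop :=
  (snafu.toList.all (fun c => c ∈ ['=', '-', '0', '1', '2'])) = true
instance (snafu : String) : Decidable (Pre_SnafuToInt snafu) := by unfold Pre_SnafuToInt; infer_instance
def pvWitness_SnafuToInt : String := "2=-01"

def Spec_SnafuToInt (snafu : String) (out : Int) : Prop := out = SnafuToInt_alt snafu
instance (snafu : String) (out : Int) : Decidable (Spec_SnafuToInt snafu out) := by unfold Spec_SnafuToInt; infer_instance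

-- ===== CLAIM (what is proved, stated in full; the proofs are below) =====
def Claim_equal_SnafuToInt : Prop := ∀ (snafu : String), Dom_SnafuToInt snafu → Pre_SnafuToInt snafu → Spec_SnafuToInt snafu (SnafuToInt snafu)

-- ===== LEMMAS AND PROOFS =====

-- Horner fold with an arbitrary start value splits off the start value times 5^length.
theorem horner_init (l : List Char) (a : Int) :
    l.foldl (fun integer c => integer * 5 + snafuDict.getD c 0) a
      = a * 5 ^ l.length + l.foldl (fun integer c => integer * 5 + snafuDict.getD c 0) 0 := by
  induction l generalizing a with
  | nil => simp
  | cons c t ih =>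
    simp only [List.foldl_cons, List.length_cons]
    rw [ih (a * 5 + snafuDict.getD c 0), ih (0 * 5 + snafuDict.getD c 0)]
    ring

-- A's positional sum over the reversed digits equals B's Horner fold over the original order.
theorem key_sum (r : List Char) :
    ((List.range r.length).map
      (fun (k : Nat) => snafuDict.getD (PySem.List.pyGetD r (k : Int) ' ') 0 * 5 ^ k)).sum
      = r.reverse.foldl (fun integer c => integer * 5 + snafuDict.getD c 0) 0 := by
  induction r using List.reverseRecOn with
  | nil => simp
  | append_singleton r' c ih =>
    rw [List.length_append, List.length_singleton, List.range_succ, List.map_append,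
        List.sum_append, List.reverse_append]
    have hlast : PySem.List.pyGetD (r' ++ [c]) (r'.length : Int) ' ' = c := by
      simp [PySem.List.pyGetD_natCast]
    have hcongr : ∀ k ∈ List.range r'.length,
        snafuDict.getD (PySem.List.pyGetD (r' ++ [c]) (k : Int) ' ') 0 * 5 ^ k
          = snafuDict.getD (PySem.List.pyGetD r' (k : Int) ' ') 0 * 5 ^ k := by
      intro k hk
      rw [List.mem_range] at hk
      simp [PySem.List.pyGetD_natCast, List.getElem?_append_left hk]
    rw [List.map_congr_left hcongr, ih]
    simp only [List.map_cons, List.map_nil, List.sum_cons, List.sum_nil, hlast,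
      List.reverse_singleton, List.singleton_append, List.foldl_cons]
    rw [horner_init r'.reverse (0 * 5 + snafuDict.getD c 0)]
    simp only [List.length_reverse]
    ring

-- ===== VERDICT (by name: the statement is the Claim_ definition above) =====
theorem SnafuToInt_spec : Claim_equal_SnafuToInt := by
  intro snafu _ _
  unfold Spec_SnafuToInt SnafuToInt SnafuToInt_alt
  simp only [PySem.List.len_eq]
  set rev := snafu.toList.reverse with hrev
  have hfun : ∀ (acc : Int), ∀ i ∈ PySem.List.pyRange 0 (rev.length : Int) 1,
      (if i = 0 then acc + snafuDict.getD (PySem.List.pyGetD rev i ' ') 0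
       else acc + snafuDict.getD (PySem.List.pyGetD rev i ' ') 0 * 5 ^ i.toNat)
        = acc + snafuDict.getD (PySem.List.pyGetD rev i ' ') 0 * 5 ^ i.toNat := by
    intro acc i _
    split_ifs with h
    · subst h; simp
    · rfl
  refine (PySem.List.foldl_congr_mem _ _ _ 0 hfun).trans ?_
  rw [PySem.List.foldl_add (l := PySem.List.pyRange 0 (rev.length : Int) 1)
      (g := fun i => snafuDict.getD (PySem.List.pyGetD rev i ' ') 0 * 5 ^ i.toNat)]
  rw [PySem.List.pyRange_one 0 (rev.length : Int)]
  simp only [Int.sub_zero, Int.toNat_natCast, List.map_map, zero_add]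
  have hmap : ∀ k ∈ List.range rev.length,
      ((fun i => snafuDict.getD (PySem.List.pyGetD rev i ' ') 0 * 5 ^ i.toNat) ∘
        fun k : Nat => (k : Int)) k
        = snafuDict.getD (PySem.List.pyGetD rev (k : Int) ' ') 0 * 5 ^ k := by
    intro k _; simp
  rw [List.map_congr_left hmap, key_sum rev, hrev, List.reverse_reverse]
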